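-- pv_equiv track=rewrite | github.com/Algorithm-Team4/Algorithm_Study | Algorithm_study/6회차(heap)/1_더 맵게.py | solution
-- ===== SOURCE A (Python) =====
-- import heapq
--
-- def solution(scoville, K):
--     heapq.heapify(scoville)  # 힙으로 변환
--     cnt = 0
--     while scoville[0] < K:  # 모든 음식의 스코빌 지수가 K 이상이 될 때까지 반복
--         if len(scoville) < 2:  # 음식이 2개 미만이면 더 이상 섞을 수 없으므로 -1 반환
--             return -1
--         mixed = heapq.heappop(scoville) + heapq.heappop(scoville) * 2  # 가장 작은 두 스코빌 지수를 섞음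
--         heapq.heappush(scoville, mixed)  # 섞은 음식을 힙에 추가
--         cnt += 1
--     return cnt
-- ===== SOURCE B (Python) =====
-- def solution(scoville, K):
--     cnt = 0
--     while min(scoville) < K:
--         if len(scoville) < 2:
--             return -1
--         first = min(scoville)
--         scoville.remove(first)
--         second = min(scoville)
--         scoville.remove(second)
--         scoville.append(first + 2 * second)
--         cnt += 1
--     return cnt
-- ===== Notes on version B (the rewrite author's own statement) =====
-- stated objective: simpler
-- what changed: Replaces the heapq priority queue by a plain list with repeated linear min-scan and remove, which is shorter and needs no import; equivalence is about the return value only (both mutate scoville, in different final orders).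
import Mathlib
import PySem

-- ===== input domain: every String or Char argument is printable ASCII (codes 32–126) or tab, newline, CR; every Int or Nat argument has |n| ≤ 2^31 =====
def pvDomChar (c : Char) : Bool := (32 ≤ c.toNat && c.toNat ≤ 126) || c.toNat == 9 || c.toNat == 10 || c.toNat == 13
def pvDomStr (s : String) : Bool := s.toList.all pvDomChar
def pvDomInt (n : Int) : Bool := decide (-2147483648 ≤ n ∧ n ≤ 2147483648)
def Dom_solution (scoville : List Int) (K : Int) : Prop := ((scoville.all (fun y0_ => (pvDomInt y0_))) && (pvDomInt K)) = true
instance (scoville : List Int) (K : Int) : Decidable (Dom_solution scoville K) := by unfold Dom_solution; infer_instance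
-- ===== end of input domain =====

-- B replaces A's heapq priority queue by a plain list with repeated linear min-scan and remove
-- (simpler, no import); both Pythons mutate `scoville` (in different final orders): the
-- equivalence proved here is about the RETURN value only.

-- ===== PORT A =====
-- CPython heapq._siftdown: bubble newitem up from pos toward startpos (returns heap and final pos;
-- the caller writes newitem at that pos, matching Python's final `heap[pos] = newitem`).
def sdLoop (heap : List Int) (startpos pos : Nat) (newitem : Int) : List Int × Nat :=
  if _h : startpos < pos then
    let parentpos := (pos - 1) / 2
    let parent := heap.getD parentpos 0
    if newitem < parent then
      sdLoop (heap.set pos parent) startpos parentpos newitem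
    else (heap, pos)
  else (heap, pos)
termination_by pos
decreasing_by
  have := Nat.div_le_self (pos - 1) 2
  omega

def siftdown (heap : List Int) (startpos pos : Nat) : List Int :=
  let newitem := heap.getD pos 0
  let r := sdLoop heap startpos pos newitem
  r.1.set r.2 newitem

-- CPython heapq._siftup: move the hole at pos down to a leaf, following the smaller child.
def suLoop (heap : List Int) (endpos pos : Nat) : List Int × Nat :=
  let childpos := 2 * pos + 1
  if _h : childpos < endpos then
    let rightpos := childpos + 1
    let childpos' := if rightpos < endpos ∧ ¬ (heap.getD childpos 0 < heap.getD rightpos 0) then rightpos else childpos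
    suLoop (heap.set pos (heap.getD childpos' 0)) endpos childpos'
  else (heap, pos)
termination_by endpos - pos
decreasing_by
  split <;> omega

def siftup (heap : List Int) (pos : Nat) : List Int :=
  let endpos := heap.length
  let startpos := pos
  let newitem := heap.getD pos 0
  let r := suLoop heap endpos pos
  siftdown (r.1.set r.2 newitem) startpos r.2

def heapify (x : List Int) : List Int :=
  (List.range (x.length / 2)).reverse.foldl (fun h i => siftup h i) x

def heappop (heap : List Int) : Int × List Int :=
  let lastelt := heap.getLast?.getD 0
  let heap := heap.dropLast
  if heap.isEmpty then (lastelt, heap)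
  else
    let returnitem := heap.getD 0 0
    let heap := heap.set 0 lastelt
    (returnitem, siftup heap 0)

def heappush (heap : List Int) (item : Int) : List Int :=
  siftdown (heap ++ [item]) 0 heap.length

-- A's while loop; fuel = initial length suffices (each iteration shrinks the heap by one;
-- the guard `heap[0]` on the empty input raises in Python and is excluded by Pre_).
def loopA : Nat → List Int → Int → Int → Int
  | 0, _, _, _ => 0
  | fuel + 1, heap, K, cnt =>
    if heap.getD 0 0 < K then
      if heap.length < 2 then -1
      else
        let p1 := heappop heap
        let p2 := heappop p1.2
        let mixed := p1.1 + p2.1 * 2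
        loopA fuel (heappush p2.2 mixed) K (cnt + 1)
    else cnt

def solution (scoville : List Int) (K : Int) : Int :=
  loopA scoville.length (heapify scoville) K 0

-- ===== PORT B =====
-- B's while loop: guard `min(scoville) < K` (raises on [] like A's guard, excluded by Pre_),
-- then remove the two minima by linear scan, append the mix.
def loopB : Nat → List Int → Int → Int → Int
  | 0, _, _, _ => 0
  | fuel + 1, l, K, cnt =>
    if (PySem.List.min? l (fun x => x)).getD 0 < K then
      if l.length < 2 then -1
      else
        let first := (PySem.List.min? l (fun x => x)).getD 0
        let l1 := (PySem.List.remove? l first).getD []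
        let second := (PySem.List.min? l1 (fun x => x)).getD 0
        let l2 := (PySem.List.remove? l1 second).getD []
        loopB fuel (l2 ++ [first + 2 * second]) K (cnt + 1)
    else cnt

def solution_alt (scoville : List Int) (K : Int) : Int :=
  loopB scoville.length scoville K 0

-- ===== PRECONDITION & SPEC =====
-- Pre_ excludes only the empty list, on which A's guard `scoville[0]` raises IndexError.
def Pre_solution (scoville : List Int) (K : Int) : Prop := scoville ≠ []
instance (scoville : List Int) (K : Int) : Decidable (Pre_solution scoville K) := by unfold Pre_solution; infer_instance
def pvWitness_solution : List Int × Int := ([1, 2, 3, 9, 10, 12], 7)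

def Spec_solution (scoville : List Int) (K : Int) (out : Int) : Prop := out = solution_alt scoville K
instance (scoville : List Int) (K : Int) (out : Int) : Decidable (Spec_solution scoville K out) := by unfold Spec_solution; infer_instance

-- ===== CLAIM (what is proved, stated in full; the proofs are below) =====
def Claim_equal_solution : Prop := ∀ (scoville : List Int) (K : Int), Dom_solution scoville K → Pre_solution scoville K → Spec_solution scoville K (solution scoville K)

-- ===== LEMMAS AND PROOFS =====

-- subtree membership: descB r j ↔ j lies in the binary-heap subtree rooted at r
def descB (r j : Nat) : Bool :=
  if j < r then false else if j = r then true else descB r ((j - 1) / 2)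
termination_by j
decreasing_by
  have := Nat.div_le_self (j - 1) 2
  omega

lemma desc_self (r : Nat) : descB r r = true := by
  rw [descB]; simp

lemma desc_le {r j : Nat} (h : descB r j = true) : r ≤ j := by
  rw [descB] at h
  split at h
  · exact absurd h (by simp)
  · split at h
    · omega
    · omega

lemma desc_step {r j : Nat} (hj : r < j) : descB r j = descB r ((j - 1) / 2) := by
  conv_lhs => rw [descB]
  rw [if_neg (by omega), if_neg (by omega)]

lemma desc_zero (j : Nat) : descB 0 j = true := by
  induction j using Nat.strong_induction_on with
  | _ j ih =>
    rcases Nat.eq_zero_or_pos j with h | h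
    · subst h; exact desc_self 0
    · rw [desc_step h]
      exact ih _ (by have := Nat.div_le_self (j - 1) 2; omega)

lemma desc_child {r p c : Nat} (hp : descB r p = true) (hc1 : 1 ≤ c)
    (hpc : (c - 1) / 2 = p) : descB r c = true := by
  have hrp := desc_le hp
  have hlt : p < c := by have := Nat.div_le_self (c - 1) 2; omega
  rw [desc_step (by omega), hpc]; exact hp

lemma desc_parent {r c : Nat} (h : descB r c = true) (hne : c ≠ r) :
    descB r ((c - 1) / 2) = true := by
  have := desc_le h
  rwa [desc_step (by omega)] at h

-- getD / set / Perm helpers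
lemma getD_set_eq (l : List Int) (i : Nat) (a : Int) (h : i < l.length) :
    (l.set i a).getD i 0 = a := by
  simp [List.getD_eq_getElem?_getD, h]

lemma getD_set_ne (l : List Int) {i j : Nat} (a : Int) (h : i ≠ j) :
    (l.set i a).getD j 0 = l.getD j 0 := by
  simp [List.getD_eq_getElem?_getD, h]


lemma set_getD_self (l : List Int) (i : Nat) (h : i < l.length) :
    l.set i (l.getD i 0) = l := by
  rw [List.getD_eq_getElem l 0 h]
  exact List.set_getElem_self h

lemma set_perm (l : List Int) (i : Nat) (a : Int) (h : i < l.length) :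
    (l.set i a).Perm (a :: l.eraseIdx i) := by
  induction l generalizing i with
  | nil => simp at h
  | cons x t ih =>
    cases i with
    | zero => simp
    | succ i =>
      simp only [List.set_cons_succ, List.eraseIdx_cons_succ]
      have h1 := (ih i (by simpa using h)).cons x
      exact h1.trans (List.Perm.swap _ _ _)

lemma getD_cons_eraseIdx_perm (l : List Int) (i : Nat) (h : i < l.length) :
    (l.getD i 0 :: l.eraseIdx i).Perm l := by
  have := set_perm l i (l.getD i 0) h
  rw [set_getD_self l i h] at this
  exact this.symm

lemma set_swap_perm (l : List Int) {i j : Nat} (hij : i ≠ j) (hi : i < l.length)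
    (hj : j < l.length) : ((l.set i (l.getD j 0)).set j (l.getD i 0)).Perm l := by
  induction l generalizing i j with
  | nil => simp at hi
  | cons x t ih =>
    match i, j with
    | 0, 0 => exact absurd rfl hij
    | 0, m + 1 =>
      have hm : m < t.length := by simpa using hj
      simp only [List.set_cons_zero, List.getD_cons_succ, List.getD_cons_zero,
        List.set_cons_succ]
      have h1 := (set_perm t m x hm).cons (t.getD m 0)
      refine h1.trans ?_
      refine (List.Perm.swap _ _ _).trans ?_
      exact (getD_cons_eraseIdx_perm t m hm).cons x
    | m + 1, 0 =>
      have hm : m < t.length := by simpa using hi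
      simp only [List.set_cons_succ, List.getD_cons_zero, List.getD_cons_succ,
        List.set_cons_zero]
      have h1 := (set_perm t m x hm).cons (t.getD m 0)
      refine h1.trans ?_
      refine (List.Perm.swap _ _ _).trans ?_
      exact (getD_cons_eraseIdx_perm t m hm).cons x
    | a + 1, b + 1 =>
      have := ih (i := a) (j := b) (by omega) (by simpa using hi) (by simpa using hj)
      simpa using this.cons x

-- heap property / partial heap property
def IsHp (h : List Int) : Prop :=
  ∀ c, 1 ≤ c → c < h.length → h.getD ((c - 1) / 2) 0 ≤ h.getD c 0

-- all parent-child edges inside the subtree rooted at r hold, except edges touching q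
def HSt (h : List Int) (r q : Nat) : Prop :=
  ∀ p c, 1 ≤ c → c < h.length → (c - 1) / 2 = p → descB r p = true → p ≠ q → c ≠ q →
    h.getD p 0 ≤ h.getD c 0

lemma head_le {h : List Int} (hh : IsHp h) : ∀ j, j < h.length → h.getD 0 0 ≤ h.getD j 0 := by
  intro j
  induction j using Nat.strong_induction_on with
  | _ j ih =>
    intro hj
    rcases Nat.eq_zero_or_pos j with h0 | h0
    · subst h0; exact le_refl _
    · have hp : (j - 1) / 2 < j := by have := Nat.div_le_self (j - 1) 2; omega
      exact le_trans (ih _ hp (lt_trans hp hj)) (hh j h0 hj)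

lemma head_le_mem {h : List Int} (hh : IsHp h) {x : Int} (hx : x ∈ h) : h.getD 0 0 ≤ x := by
  obtain ⟨i, hi, rfl⟩ := List.getElem_of_mem hx
  rw [← List.getD_eq_getElem h 0 hi]
  exact head_le hh i hi

lemma getD_zero_mem {h : List Int} (hne : h ≠ []) : h.getD 0 0 ∈ h := by
  have : 0 < h.length := List.length_pos_iff.mpr hne
  rw [List.getD_eq_getElem h 0 this]
  exact List.getElem_mem this

-- ===== sdLoop / siftdown correctness =====
lemma sdLoop_step (g : List Int) (p0 pos : Nat) (newitem : Int) (h1 : p0 < pos)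
    (h2 : newitem < g.getD ((pos - 1) / 2) 0) :
    sdLoop g p0 pos newitem =
      sdLoop (g.set pos (g.getD ((pos - 1) / 2) 0)) p0 ((pos - 1) / 2) newitem := by
  rw [sdLoop, dif_pos h1, if_pos h2]

lemma sdLoop_stop (g : List Int) (p0 pos : Nat) (newitem : Int)
    (h : ¬ p0 < pos ∨ ¬ newitem < g.getD ((pos - 1) / 2) 0) :
    sdLoop g p0 pos newitem = (g, pos) := by
  rw [sdLoop]
  rcases h with h | h
  · rw [dif_neg h]
  · by_cases h1 : p0 < pos
    · rw [dif_pos h1, if_neg h]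
    · rw [dif_neg h1]

lemma sdLoop_stop_spec (newitem : Int) (p0 pos : Nat) (g : List Int)
    (hpos : pos < g.length) (hdesc : descB p0 pos = true)
    (hB5 : HSt g p0 pos)
    (hB6 : ∀ c, 1 ≤ c → c < g.length → (c - 1) / 2 = pos → newitem ≤ g.getD c 0)
    (hstop : ¬ p0 < pos ∨ ¬ newitem < g.getD ((pos - 1) / 2) 0) :
    (∀ p c, 1 ≤ c → c < g.length → (c - 1) / 2 = p → descB p0 p = true →
      (g.set pos newitem).getD p 0 ≤ (g.set pos newitem).getD c 0) := by
  intro p c hc1 hclen hcp hdescp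
  by_cases hcpos : c = pos
  · subst hcpos
    have hppos : p ≠ c := by
      have := Nat.div_le_self (c - 1) 2
      omega
    rw [getD_set_eq g c newitem hpos, getD_set_ne g newitem (fun h => hppos h.symm)]
    rcases hstop with h | h
    · -- pos = p0, but parent p of pos is a strict ancestor: contradiction with descB p0 p
      have h1 : p0 ≤ c := desc_le hdesc
      have h2 : p0 ≤ p := desc_le hdescp
      have := Nat.div_le_self (c - 1) 2
      omega
    · rw [hcp] at h
      omega
  · by_cases hppos : p = pos
    · subst hppos
      rw [getD_set_eq g p newitem hpos, getD_set_ne g newitem (fun h => hcpos h.symm)]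
      exact hB6 c hc1 hclen (by rw [hcp])
    · rw [getD_set_ne g newitem (fun h => hppos h.symm), getD_set_ne g newitem (fun h => hcpos h.symm)]
      exact hB5 p c hc1 hclen hcp hdescp hppos hcpos

lemma sdLoop_spec (newitem : Int) (p0 : Nat) :
    ∀ pos (g : List Int), pos < g.length → descB p0 pos = true →
    HSt g p0 pos →
    (∀ c, 1 ≤ c → c < g.length → (c - 1) / 2 = pos → newitem ≤ g.getD c 0) →
    (pos ≠ p0 → ∀ c, 1 ≤ c → c < g.length → (c - 1) / 2 = pos →
        g.getD ((pos - 1) / 2) 0 ≤ g.getD c 0) →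
    (sdLoop g p0 pos newitem).1.length = g.length ∧
    (sdLoop g p0 pos newitem).2 < g.length ∧
    descB p0 (sdLoop g p0 pos newitem).2 = true ∧
    ((sdLoop g p0 pos newitem).1.set (sdLoop g p0 pos newitem).2 newitem).Perm (g.set pos newitem) ∧
    (∀ k, descB p0 k = false → (sdLoop g p0 pos newitem).1.getD k 0 = g.getD k 0) ∧
    (∀ p c, 1 ≤ c → c < g.length → (c - 1) / 2 = p → descB p0 p = true →
      ((sdLoop g p0 pos newitem).1.set (sdLoop g p0 pos newitem).2 newitem).getD p 0 ≤
      ((sdLoop g p0 pos newitem).1.set (sdLoop g p0 pos newitem).2 newitem).getD c 0) := by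
  intro pos
  induction pos using Nat.strong_induction_on with
  | _ pos ih =>
    intro g hpos hdesc hB5 hB6 hB7
    by_cases hgt : p0 < pos
    · by_cases hlt : newitem < g.getD ((pos - 1) / 2) 0
      · -- recursive case
        have hpp1 : pos ≥ 1 := by omega
        have hpplt : (pos - 1) / 2 < pos := by
          have := Nat.div_le_self (pos - 1) 2; omega
        have hpplen : (pos - 1) / 2 < g.length := lt_trans hpplt hpos
        have hppne : (pos - 1) / 2 ≠ pos := by omega
        have hdpp : descB p0 ((pos - 1) / 2) = true := desc_parent hdesc (by omega)
        -- the new list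
        set g' := g.set pos (g.getD ((pos - 1) / 2) 0) with hg'
        have hlen' : g'.length = g.length := by simp [hg']
        -- preconditions for the recursive call
        have pre5 : HSt g' p0 ((pos - 1) / 2) := by
          intro p c hc1 hclen hcp hdescp hpne hcne
          rw [hlen'] at hclen
          by_cases hcpos : c = pos
          · exact absurd (by rw [← hcp, hcpos]) hpne
          · by_cases hppos : p = pos
            · subst hppos
              rw [hg', getD_set_eq g _ _ hpos, getD_set_ne g _ (fun h => hcpos h.symm)]
              exact hB7 (by omega) c hc1 hclen (by rw [hcp])
            · rw [hg', getD_set_ne g _ (fun h => hppos h.symm),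
                getD_set_ne g _ (fun h => hcpos h.symm)]
              exact hB5 p c hc1 hclen hcp hdescp hppos hcpos
        have pre6 : ∀ c, 1 ≤ c → c < g'.length → (c - 1) / 2 = (pos - 1) / 2 →
            newitem ≤ g'.getD c 0 := by
          intro c hc1 hclen hcp
          rw [hlen'] at hclen
          by_cases hcpos : c = pos
          · subst hcpos
            rw [hg', getD_set_eq g _ _ hpos]
            exact le_of_lt hlt
          · rw [hg', getD_set_ne g _ (fun h => hcpos h.symm)]
            refine le_trans (le_of_lt hlt) ?_
            exact hB5 ((pos - 1) / 2) c hc1 hclen hcp hdpp hppne hcpos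
        have pre7 : (pos - 1) / 2 ≠ p0 → ∀ c, 1 ≤ c → c < g'.length →
            (c - 1) / 2 = (pos - 1) / 2 →
            g'.getD (((pos - 1) / 2 - 1) / 2) 0 ≤ g'.getD c 0 := by
          intro hppp0 c hc1 hclen hcp
          rw [hlen'] at hclen
          have hpp1' : (pos - 1) / 2 ≥ 1 := by
            have := desc_le hdpp; omega
          have hgplt : ((pos - 1) / 2 - 1) / 2 < (pos - 1) / 2 := by
            have := Nat.div_le_self ((pos - 1) / 2 - 1) 2; omega
          have hgpne : ((pos - 1) / 2 - 1) / 2 ≠ pos := by omega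
          have hgdesc : descB p0 (((pos - 1) / 2 - 1) / 2) = true := desc_parent hdpp hppp0
          have edge1 : g.getD (((pos - 1) / 2 - 1) / 2) 0 ≤ g.getD ((pos - 1) / 2) 0 :=
            hB5 _ _ hpp1' hpplen rfl hgdesc hgpne hppne
          by_cases hcpos : c = pos
          · subst hcpos
            rw [hg', getD_set_eq g _ _ hpos, getD_set_ne g _ (fun h => hgpne h.symm)]
            exact edge1
          · rw [hg', getD_set_ne g _ (fun h => hgpne h.symm),
              getD_set_ne g _ (fun h => hcpos h.symm)]
            exact le_trans edge1 (hB5 _ _ hc1 hclen hcp hdpp hppne hcpos)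
        obtain ⟨c1, c2, c3, c4, c5, c6⟩ :=
          ih ((pos - 1) / 2) hpplt g' (by rw [hlen']; exact hpplen) hdpp pre5 pre6 pre7
        rw [sdLoop_step g p0 pos newitem hgt hlt]
        rw [hlen'] at c1 c2
        refine ⟨c1, c2, c3, ?_, ?_, ?_⟩
        · -- permutation: compose with the swap of positions pos and (pos-1)/2
          refine c4.trans ?_
          have e1 : g' = (g.set pos newitem).set pos (g.getD ((pos - 1) / 2) 0) := by
            rw [hg', List.set_set]
          have e2 : (g.set pos newitem).getD ((pos - 1) / 2) 0 = g.getD ((pos - 1) / 2) 0 :=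
            getD_set_ne g newitem hppne.symm
          have e3 : (g.set pos newitem).getD pos 0 = newitem :=
            getD_set_eq g pos newitem hpos
          have := set_swap_perm (g.set pos newitem) (i := pos) (j := (pos - 1) / 2)
            (fun h => hppne h.symm) (by simpa using hpos) (by simpa using hpplen)
          rw [e2, e3, ← e1] at this
          exact this
        · intro k hk
          have hkpos : k ≠ pos := fun h => by rw [h, hdesc] at hk; cases hk
          rw [c5 k hk, hg', getD_set_ne g _ (fun h => hkpos h.symm)]
        · intro p c hc1 hclen hcp hdescp
          exact c6 p c hc1 (by rw [hlen']; exact hclen) hcp hdescp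
      · -- stop: newitem in place
        rw [sdLoop_stop g p0 pos newitem (Or.inr hlt)]
        exact ⟨rfl, hpos, hdesc, List.Perm.refl _, fun k _ => rfl,
          sdLoop_stop_spec newitem p0 pos g hpos hdesc hB5 hB6 (Or.inr hlt)⟩
    · rw [sdLoop_stop g p0 pos newitem (Or.inl hgt)]
      exact ⟨rfl, hpos, hdesc, List.Perm.refl _, fun k _ => rfl,
        sdLoop_stop_spec newitem p0 pos g hpos hdesc hB5 hB6 (Or.inl hgt)⟩

lemma suLoop_stop (g : List Int) (endpos pos : Nat) (h : ¬ 2 * pos + 1 < endpos) :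
    suLoop g endpos pos = (g, pos) := by
  rw [suLoop, dif_neg h]

lemma suLoop_step (g : List Int) (endpos pos : Nat) (h : 2 * pos + 1 < endpos) :
    suLoop g endpos pos =
      suLoop (g.set pos (g.getD (if 2 * pos + 1 + 1 < endpos ∧
          ¬ (g.getD (2 * pos + 1) 0 < g.getD (2 * pos + 1 + 1) 0) then 2 * pos + 1 + 1
          else 2 * pos + 1) 0)) endpos
        (if 2 * pos + 1 + 1 < endpos ∧
          ¬ (g.getD (2 * pos + 1) 0 < g.getD (2 * pos + 1 + 1) 0) then 2 * pos + 1 + 1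
          else 2 * pos + 1) := by
  rw [suLoop, dif_pos h]

lemma suLoop_spec :
    ∀ (fuel : Nat) (g : List Int) (pos p0 : Nat), g.length - pos ≤ fuel →
    pos < g.length → descB p0 pos = true →
    HSt g p0 pos →
    (pos ≠ p0 → ∀ c, 1 ≤ c → c < g.length → (c - 1) / 2 = pos →
        g.getD ((pos - 1) / 2) 0 ≤ g.getD c 0) →
    (suLoop g g.length pos).1.length = g.length ∧
    (suLoop g g.length pos).2 < g.length ∧
    descB p0 (suLoop g g.length pos).2 = true ∧
    g.length ≤ 2 * (suLoop g g.length pos).2 + 1 ∧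
    (∀ x : Int, ((suLoop g g.length pos).1.set (suLoop g g.length pos).2 x).Perm (g.set pos x)) ∧
    (∀ k, descB p0 k = false → (suLoop g g.length pos).1.getD k 0 = g.getD k 0) ∧
    HSt (suLoop g g.length pos).1 p0 (suLoop g g.length pos).2 ∧
    ((suLoop g g.length pos).2 ≠ p0 → ∀ c, 1 ≤ c → c < g.length →
       (c - 1) / 2 = (suLoop g g.length pos).2 →
       (suLoop g g.length pos).1.getD (((suLoop g g.length pos).2 - 1) / 2) 0 ≤
       (suLoop g g.length pos).1.getD c 0) := by
  intro fuel
  induction fuel with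
  | zero => intro g pos p0 hf hpos _ _ _; omega
  | succ fuel ih =>
    intro g pos p0 hf hpos hdesc hB5 hB7
    by_cases hstep : 2 * pos + 1 < g.length
    · -- the hole moves to the smaller child c'
      set c' := (if 2 * pos + 1 + 1 < g.length ∧
          ¬ (g.getD (2 * pos + 1) 0 < g.getD (2 * pos + 1 + 1) 0) then 2 * pos + 1 + 1
          else 2 * pos + 1) with hc'def
      have hc'lt : c' < g.length := by
        rw [hc'def]; split_ifs with hsp
        · exact hsp.1
        · exact hstep
      have hc'rng : c' = 2 * pos + 1 ∨ c' = 2 * pos + 2 := by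
        rw [hc'def]; split_ifs <;> omega
      have hc'par : (c' - 1) / 2 = pos := by rcases hc'rng with h | h <;> rw [h] <;> omega
      have hc'1 : 1 ≤ c' := by omega
      have hposc' : pos ≠ c' := by omega
      have hdesc' : descB p0 c' = true := desc_child hdesc hc'1 hc'par
      have hc'min : ∀ s, s < g.length → (s - 1) / 2 = pos → 1 ≤ s → s ≠ c' →
          g.getD c' 0 ≤ g.getD s 0 := by
        intro s hslen hspar hs1 hsne
        have hsrng : s = 2 * pos + 1 ∨ s = 2 * pos + 2 := by omega
        by_cases hsp : 2 * pos + 1 + 1 < g.length ∧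
            ¬ (g.getD (2 * pos + 1) 0 < g.getD (2 * pos + 1 + 1) 0)
        · rw [hc'def, if_pos hsp] at hsne ⊢
          have hs : s = 2 * pos + 1 := by omega
          rw [hs]
          have h2 := hsp.2
          omega
        · rw [hc'def, if_neg hsp] at hsne ⊢
          have hs : s = 2 * pos + 2 := by omega
          rw [not_and_or, not_not] at hsp
          rcases hsp with h | h
          · exact absurd (by omega : 2 * pos + 1 + 1 < g.length) h
          · rw [hs]
            exact le_of_lt h
      set g' := g.set pos (g.getD c' 0) with hg'def
      have hlen' : g'.length = g.length := by rw [hg'def]; simp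
      -- preconditions for the recursive call
      have pre5 : HSt g' p0 c' := by
        intro p c hc1 hclen hcp hdescp hpne hcne
        rw [hlen'] at hclen
        by_cases hcpos : c = pos
        · subst hcpos
          have hp1 : 1 ≤ c := hc1
          have hppar : p < c := by have := Nat.div_le_self (c - 1) 2; omega
          have hpnec : p ≠ c := by omega
          have hpnec' : p ≠ c' := by omega
          rw [hg'def, getD_set_eq g _ _ hpos, getD_set_ne g _ (fun h => hpnec h.symm)]
          have hcnep0 : c ≠ p0 := by have := desc_le hdescp; omega
          have := hB7 hcnep0 c' hc'1 hc'lt hc'par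
          rw [hcp] at this
          exact this
        · by_cases hppos : p = pos
          · subst hppos
            rw [hg'def, getD_set_eq g _ _ hpos, getD_set_ne g _ (fun h => hcpos h.symm)]
            exact hc'min c hclen (by rw [hcp]) hc1 hcne
          · rw [hg'def, getD_set_ne g _ (fun h => hppos h.symm),
              getD_set_ne g _ (fun h => hcpos h.symm)]
            exact hB5 p c hc1 hclen hcp hdescp hppos hcpos
      have pre7 : c' ≠ p0 → ∀ d, 1 ≤ d → d < g'.length → (d - 1) / 2 = c' →
          g'.getD ((c' - 1) / 2) 0 ≤ g'.getD d 0 := by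
        intro _ d hd1 hdlen hdp
        rw [hlen'] at hdlen
        have hdgt : c' < d := by have := Nat.div_le_self (d - 1) 2; omega
        have hdne : d ≠ pos := by omega
        rw [hc'par, hg'def, getD_set_eq g _ _ hpos, getD_set_ne g _ (fun h => hdne h.symm)]
        exact hB5 c' d hd1 hdlen hdp hdesc' (fun h => hposc' h.symm) hdne
      have hfuel' : g'.length - c' ≤ fuel := by rw [hlen']; omega
      obtain ⟨c1, c2, c3, c4, c5, c6, c7, c8⟩ :=
        ih g' c' p0 hfuel' (by rw [hlen']; exact hc'lt) hdesc' pre5 pre7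
      rw [suLoop_step g g.length pos hstep, ← hc'def, ← hg'def]
      rw [hlen'] at c1 c2 c3 c4 c5 c6 c7 c8
      refine ⟨c1, c2, c3, c4, ?_, ?_, c7, c8⟩
      · intro x
        refine (c5 x).trans ?_
        have e1 : g' = (g.set pos x).set pos (g.getD c' 0) := by
          rw [hg'def, List.set_set]
        have e2 : (g.set pos x).getD c' 0 = g.getD c' 0 :=
          getD_set_ne g x hposc'
        have e3 : (g.set pos x).getD pos 0 = x := getD_set_eq g pos x hpos
        have := set_swap_perm (g.set pos x) (i := pos) (j := c') hposc'
          (by simpa using hpos) (by simpa using hc'lt)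
        rw [e2, e3, ← e1] at this
        exact this
      · intro k hk
        have hkpos : k ≠ pos := fun h => by rw [h, hdesc] at hk; cases hk
        rw [c6 k hk, hg'def, getD_set_ne g _ (fun h => hkpos h.symm)]
    · rw [suLoop_stop g g.length pos hstep]
      exact ⟨rfl, hpos, hdesc, by omega, fun x => List.Perm.refl _, fun k _ => rfl, hB5, hB7⟩

theorem siftup_spec' (g : List Int) (pos : Nat) (hpos : pos < g.length)
    (hpre : HSt g pos pos) :
    (siftup g pos).length = g.length ∧ (siftup g pos).Perm g ∧
    (∀ k, descB pos k = false → (siftup g pos).getD k 0 = g.getD k 0) ∧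
    (∀ p c, 1 ≤ c → c < g.length → (c - 1) / 2 = p → descB pos p = true →
      (siftup g pos).getD p 0 ≤ (siftup g pos).getD c 0) := by
  obtain ⟨c1, c2, c3, c4, c5, c6, c7, c8⟩ :=
    suLoop_spec g.length g pos pos (by omega) hpos (desc_self pos) hpre (fun h => absurd rfl h)
  have hr2 : (suLoop g g.length pos).2 < (suLoop g g.length pos).1.length := by rw [c1]; exact c2
  have e : siftup g pos =
      (sdLoop ((suLoop g g.length pos).1.set (suLoop g g.length pos).2 (g.getD pos 0))
          pos (suLoop g g.length pos).2 (g.getD pos 0)).1.set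
        (sdLoop ((suLoop g g.length pos).1.set (suLoop g g.length pos).2 (g.getD pos 0))
          pos (suLoop g g.length pos).2 (g.getD pos 0)).2 (g.getD pos 0) := by
    simp only [siftup, siftdown]
    rw [getD_set_eq _ _ _ hr2]
  set r := suLoop g g.length pos with hrdef
  set ni := g.getD pos 0 with hnidef
  set g2 := r.1.set r.2 ni with hg2def
  have hg2len : g2.length = g.length := by rw [hg2def]; simp [c1]
  have hpos2 : r.2 < g2.length := by rw [hg2len]; exact c2
  have pre5 : HSt g2 pos r.2 := by
    intro p c hc1 hclen hcp hdescp hpne hcne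
    rw [hg2def, getD_set_ne _ _ (fun h => hpne h.symm), getD_set_ne _ _ (fun h => hcne h.symm)]
    exact c7 p c hc1 (by rw [c1, ← hg2len]; exact hclen) hcp hdescp hpne hcne
  have pre6 : ∀ c, 1 ≤ c → c < g2.length → (c - 1) / 2 = r.2 → ni ≤ g2.getD c 0 := by
    intro c hc1 hclen hcp
    rw [hg2len] at hclen
    have : 2 * r.2 + 1 ≤ c := by omega
    omega
  have pre7 : r.2 ≠ pos → ∀ c, 1 ≤ c → c < g2.length → (c - 1) / 2 = r.2 →
      g2.getD ((r.2 - 1) / 2) 0 ≤ g2.getD c 0 := by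
    intro _ c hc1 hclen hcp
    rw [hg2len] at hclen
    have : 2 * r.2 + 1 ≤ c := by omega
    omega
  obtain ⟨d1, d2, d3, d4, d5, d6⟩ := sdLoop_spec ni pos r.2 g2 hpos2 c3 pre5 pre6 pre7
  rw [e]
  refine ⟨?_, ?_, ?_, ?_⟩
  · simp [d1, hg2len]
  · have p1 : ((sdLoop g2 pos r.2 ni).1.set (sdLoop g2 pos r.2 ni).2 ni).Perm (g2.set r.2 ni) := d4
    have e2 : g2.set r.2 ni = g2 := by rw [hg2def, List.set_set]
    have p2 : g2.Perm (g.set pos ni) := c5 ni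
    have e3 : g.set pos ni = g := set_getD_self g pos hpos
    rw [e2] at p1
    rw [e3] at p2
    exact p1.trans p2
  · intro k hk
    have hk2 : k ≠ (sdLoop g2 pos r.2 ni).2 := fun h => by rw [h, d3] at hk; cases hk
    have hkr : k ≠ r.2 := fun h => by rw [h, c3] at hk; cases hk
    rw [getD_set_ne _ _ (fun h => hk2 h.symm), d5 k hk, hg2def,
      getD_set_ne _ _ (fun h => hkr h.symm)]
    exact c6 k hk
  · intro p c hc1 hclen hcp hdescp
    exact d6 p c hc1 (by rw [hg2len]; exact hclen) hcp hdescp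

def Qh' (k : Nat) (h : List Int) : Prop :=
  ∀ p c, 1 ≤ c → c < h.length → (c - 1) / 2 = p → k ≤ p → h.getD p 0 ≤ h.getD c 0

lemma heapify_fold : ∀ (i : Nat) (h : List Int), i ≤ h.length → Qh' i h →
    ((List.range i).reverse.foldl (fun h i => siftup h i) h).length = h.length ∧
    ((List.range i).reverse.foldl (fun h i => siftup h i) h).Perm h ∧
    Qh' 0 ((List.range i).reverse.foldl (fun h i => siftup h i) h) := by
  intro i
  induction i with
  | zero => intro h _ hQ; exact ⟨rfl, List.Perm.refl _, hQ⟩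
  | succ i ih =>
    intro h hle hQ
    have hrw : (List.range (i + 1)).reverse = i :: (List.range i).reverse := by
      rw [List.range_succ, List.reverse_append]; rfl
    rw [hrw, List.foldl_cons]
    have hpos : i < h.length := by omega
    obtain ⟨s1, s2, s3, s4⟩ := siftup_spec' h i hpos (by
      intro p c hc1 hclen hcp hdescp hpne hcne
      exact hQ p c hc1 hclen hcp (by have := desc_le hdescp; omega))
    have hQ' : Qh' i (siftup h i) := by
      intro p c hc1 hclen hcp hip
      rw [s1] at hclen
      cases hdb : descB i p with
      | true => exact s4 p c hc1 hclen hcp hdb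
      | false =>
        have hpne : p ≠ i := fun e => by rw [e, desc_self] at hdb; cases hdb
        have hcnd : descB i c = false := by
          cases hcb : descB i c with
          | false => rfl
          | true =>
            have hci : c ≠ i := by
              have := Nat.div_le_self (c - 1) 2; omega
            have := desc_parent hcb hci
            rw [hcp, hdb] at this
            cases this
        rw [s3 p hdb, s3 c hcnd]
        exact hQ p c hc1 hclen hcp (by omega)
    obtain ⟨t1, t2, t3⟩ := ih (siftup h i) (by omega) hQ'
    exact ⟨t1.trans s1, t2.trans s2, t3⟩

theorem heapify_spec' (x : List Int) :
    (heapify x).length = x.length ∧ (heapify x).Perm x ∧ IsHp (heapify x) := by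
  have hbase : Qh' (x.length / 2) x := by
    intro p c hc1 hclen hcp hip
    omega
  obtain ⟨t1, t2, t3⟩ := heapify_fold (x.length / 2) x (by omega) hbase
  refine ⟨t1, t2, ?_⟩
  intro c hc1 hclen
  exact t3 ((c - 1) / 2) c hc1 hclen rfl (by omega)

theorem heappop_spec' (h : List Int) (hne : h ≠ []) (hh : IsHp h) :
    (heappop h).1 = h.getD 0 0 ∧ (heappop h).2.length + 1 = h.length ∧
    ((heappop h).1 :: (heappop h).2).Perm h ∧ IsHp (heappop h).2 := by
  match h with
  | [] => exact absurd rfl hne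
  | [a] =>
    refine ⟨by simp [heappop], by simp [heappop], by simp [heappop], ?_⟩
    intro c hc1 hclen
    simp [heappop] at hclen
  | a :: b :: t =>
    have hT : (b :: t : List Int) ≠ [] := by simp
    have e : heappop (a :: b :: t) =
        (a, siftup (((b :: t).getLast hT) :: (b :: t).dropLast) 0) := by
      simp [heappop, List.getLast?_cons_cons, List.getLast?_eq_some_getLast hT,
        List.dropLast_cons₂]
    set L := (b :: t).getLast hT with hL
    set h2 := L :: (b :: t).dropLast with hh2
    have hlen2 : h2.length = t.length + 1 := by simp [hh2]
    have hval : ∀ j, 1 ≤ j → j < h2.length → h2.getD j 0 = (a :: b :: t).getD j 0 := by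
      intro j hj1 hjlen
      match j with
      | k + 1 =>
        have hk : k < (b :: t).dropLast.length := by
          simp only [hh2, List.length_cons] at hjlen; simpa using hjlen
        have hk2 : k < (b :: t).length := by simp at hk ⊢; omega
        rw [hh2, List.getD_cons_succ, List.getD_cons_succ,
          List.getD_eq_getElem _ _ hk, List.getD_eq_getElem _ _ hk2,
          List.getElem_dropLast]
    have hpre : HSt h2 0 0 := by
      intro p c hc1 hclen hcp hdescp hpne hcne
      have hplt : p < c := by have := Nat.div_le_self (c - 1) 2; omega
      have hp1 : 1 ≤ p := by omega
      rw [hval p hp1 (by omega), hval c hc1 hclen]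
      have hclt : c < (a :: b :: t).length := by
        simp only [List.length_cons]
        rw [hlen2] at hclen
        simp
        omega
      have := hh c hc1 hclt
      rw [hcp] at this
      exact this
    obtain ⟨s1, s2, s3, s4⟩ := siftup_spec' h2 0 (by simp [hh2]) hpre
    rw [e]
    refine ⟨by simp, ?_, ?_, ?_⟩
    · simp only [s1, hlen2, List.length_cons]
    · refine List.Perm.cons a ?_
      refine s2.trans ?_
      have : (b :: t).dropLast ++ [L] = b :: t := List.dropLast_append_getLast hT
      calc h2.Perm ((b :: t).dropLast ++ [L]) := (List.perm_append_singleton _ _).symm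
        _ = b :: t := this
    · intro c hc1 hclen
      rw [s1] at hclen
      exact s4 ((c - 1) / 2) c hc1 hclen rfl (desc_zero _)

theorem heappush_spec' (h : List Int) (v : Int) (hh : IsHp h) :
    (heappush h v).length = h.length + 1 ∧ (heappush h v).Perm (v :: h) ∧
    IsHp (heappush h v) := by
  have hlen : (h ++ [v]).length = h.length + 1 := by simp
  have hget : (h ++ [v]).getD h.length 0 = v := by
    rw [List.getD_eq_getElem _ _ (by simp)]
    exact List.getElem_concat_length rfl _
  have hval : ∀ j, j < h.length → (h ++ [v]).getD j 0 = h.getD j 0 := by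
    intro j hj
    rw [List.getD_eq_getElem _ _ (by simp; omega), List.getD_eq_getElem _ _ hj]
    exact List.getElem_append_left hj
  have e : heappush h v = siftdown (h ++ [v]) 0 h.length := rfl
  have hpre5 : HSt (h ++ [v]) 0 h.length := by
    intro p c hc1 hclen hcp hdescp hpne hcne
    rw [hlen] at hclen
    have hclt : c < h.length := by omega
    have hplt : p < c := by have := Nat.div_le_self (c - 1) 2; omega
    rw [hval p (by omega), hval c hclt]
    have := hh c hc1 hclt
    rw [hcp] at this
    exact this
  have hpre6 : ∀ c, 1 ≤ c → c < (h ++ [v]).length → (c - 1) / 2 = h.length →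
      (h ++ [v]).getD h.length 0 ≤ (h ++ [v]).getD c 0 := by
    intro c hc1 hclen hcp
    rw [hlen] at hclen
    omega
  have hpre7 : h.length ≠ 0 → ∀ c, 1 ≤ c → c < (h ++ [v]).length → (c - 1) / 2 = h.length →
      (h ++ [v]).getD ((h.length - 1) / 2) 0 ≤ (h ++ [v]).getD c 0 := by
    intro _ c hc1 hclen hcp
    rw [hlen] at hclen
    omega
  obtain ⟨d1, d2, d3, d4, d5, d6⟩ := sdLoop_spec ((h ++ [v]).getD h.length 0) 0 h.length
    (h ++ [v]) (by simp) (desc_zero _) hpre5 hpre6 hpre7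
  have e2 : siftdown (h ++ [v]) 0 h.length =
      (sdLoop (h ++ [v]) 0 h.length ((h ++ [v]).getD h.length 0)).1.set
        (sdLoop (h ++ [v]) 0 h.length ((h ++ [v]).getD h.length 0)).2
        ((h ++ [v]).getD h.length 0) := by
    simp only [siftdown]
  rw [e, e2]
  have hsetperm : ((h ++ [v]).set h.length ((h ++ [v]).getD h.length 0)) = h ++ [v] :=
    set_getD_self _ _ (by simp)
  refine ⟨by rw [List.length_set, d1, hlen], ?_, ?_⟩
  · refine d4.trans ?_
    rw [hsetperm]
    exact List.perm_append_singleton v h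
  · intro c hc1 hclen
    have : c < (h ++ [v]).length := by
      simp only [List.length_set, d1] at hclen
      exact hclen
    exact d6 ((c - 1) / 2) c hc1 this rfl (desc_zero _)

lemma min?_eq_head {hA lB : List Int} (hperm : hA.Perm lB) (hh : IsHp hA) (hne : hA ≠ []) :
    PySem.List.min? lB (fun x => x) = some (hA.getD 0 0) := by
  have hlne : lB ≠ [] := fun h => hne (List.eq_nil_of_length_eq_zero (by simp [hperm.length_eq, h]))
  cases hm : PySem.List.min? lB (fun x => x) with
  | none => exact absurd ((PySem.List.min?_eq_none_iff lB _).mp hm) hlne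
  | some m =>
    have hmem : m ∈ hA := hperm.mem_iff.mpr (PySem.List.min?_mem hm)
    have h1 : hA.getD 0 0 ≤ m := head_le_mem hh hmem
    have h2 : m ≤ hA.getD 0 0 :=
      PySem.List.min?_isMin hm _ (hperm.mem_iff.mp (getD_zero_mem hne))
    rw [le_antisymm h2 h1]

lemma loop_eq' : ∀ (fuel : Nat) (hA lB : List Int) (K cnt : Int),
    hA.Perm lB → IsHp hA → hA ≠ [] → hA.length ≤ fuel →
    loopA fuel hA K cnt = loopB fuel lB K cnt := by
  intro fuel
  induction fuel with
  | zero =>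
    intro hA lB K cnt _ _ hne hlen
    exact absurd (List.eq_nil_of_length_eq_zero (by omega)) hne
  | succ fuel ih =>
    intro hA lB K cnt hperm hheap hne hlen
    have hmin : PySem.List.min? lB (fun x => x) = some (hA.getD 0 0) :=
      min?_eq_head hperm hheap hne
    rw [loopA, loopB, hmin]
    simp only [Option.getD_some]
    by_cases hg : hA.getD 0 0 < K
    · rw [if_pos hg, if_pos hg]
      have hleneq : lB.length = hA.length := hperm.length_eq.symm
      by_cases h2 : hA.length < 2
      · rw [if_pos h2, if_pos (by omega : lB.length < 2)]
      · rw [if_neg h2, if_neg (by omega : ¬ lB.length < 2)]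
        obtain ⟨a1, a2, a3, a4⟩ := heappop_spec' hA hne hheap
        have hne1 : (heappop hA).2 ≠ [] := by
          intro h
          rw [h] at a2
          simp at a2
          omega
        obtain ⟨b1, b2, b3, b4⟩ := heappop_spec' (heappop hA).2 hne1 a4
        have hmem1 : hA.getD 0 0 ∈ lB := hperm.mem_iff.mp (getD_zero_mem hne)
        have hrem1 : PySem.List.remove? lB (hA.getD 0 0) = some (lB.erase (hA.getD 0 0)) :=
          PySem.List.remove?_eq_some_erase lB _ hmem1
        have hp1 : (heappop hA).2.Perm (lB.erase (hA.getD 0 0)) := by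
          have t1 : (hA.getD 0 0 :: (heappop hA).2).Perm hA := by rw [← a1]; exact a3
          exact (t1.trans (hperm.trans (List.perm_cons_erase hmem1))).cons_inv
        have hmin2 : PySem.List.min? (lB.erase (hA.getD 0 0)) (fun x => x) =
            some ((heappop hA).2.getD 0 0) := min?_eq_head hp1 a4 hne1
        have hmem2 : (heappop hA).2.getD 0 0 ∈ lB.erase (hA.getD 0 0) :=
          hp1.mem_iff.mp (getD_zero_mem hne1)
        have hrem2 : PySem.List.remove? (lB.erase (hA.getD 0 0)) ((heappop hA).2.getD 0 0) =
            some ((lB.erase (hA.getD 0 0)).erase ((heappop hA).2.getD 0 0)) :=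
          PySem.List.remove?_eq_some_erase _ _ hmem2
        have hp2 : (heappop (heappop hA).2).2.Perm
            ((lB.erase (hA.getD 0 0)).erase ((heappop hA).2.getD 0 0)) := by
          have t1 : ((heappop hA).2.getD 0 0 :: (heappop (heappop hA).2).2).Perm (heappop hA).2 := by
            rw [← b1]; exact b3
          exact (t1.trans (hp1.trans (List.perm_cons_erase hmem2))).cons_inv
        rw [hrem1]
        simp only [Option.getD_some]
        rw [hmin2]
        simp only [Option.getD_some]
        rw [hrem2]
        simp only [Option.getD_some]
        rw [a1, b1]
        obtain ⟨u1, u2, u3⟩ := heappush_spec' (heappop (heappop hA).2).2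
          (hA.getD 0 0 + (heappop hA).2.getD 0 0 * 2) b4
        have hmix : hA.getD 0 0 + (heappop hA).2.getD 0 0 * 2 =
            hA.getD 0 0 + 2 * (heappop hA).2.getD 0 0 := by ring
        refine ih _ _ K (cnt + 1) ?_ u3 ?_ ?_
        · refine u2.trans ?_
          rw [hmix]
          exact ((hp2.cons _).trans (List.perm_append_singleton _ _).symm)
        · intro hnil
          rw [hnil] at u1
          simp at u1
        · omega
    · rw [if_neg hg, if_neg hg]

-- ===== VERDICT (by name: the statement is the Claim_ definition above) =====
theorem solution_spec : Claim_equal_solution := by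
  intro scoville K _hdom hpre
  unfold Spec_solution solution solution_alt
  obtain ⟨hlen, hperm, hheap⟩ := heapify_spec' scoville
  have hne : heapify scoville ≠ [] := by
    intro h
    exact hpre (List.eq_nil_of_length_eq_zero (by rw [← hlen, h]; rfl))
  rw [← hlen]
  exact loop_eq' _ _ _ K 0 hperm hheap hne (le_refl _)
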